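-- pv_equiv track=rewrite | github.com/misterkoko92/asf-wms | wms/planning/solver.py | _solve_lexicographic_flight_distribution
-- ===== SOURCE A (Python) =====
-- from functools import cache
--
-- def _solve_lexicographic_flight_distribution(
--     shipment_weights: tuple[int, ...],
--     volunteer_capacities: tuple[int, ...],
-- ) -> tuple[int, ...] | None:
--     @cache
--     def _assign(index: int, remaining_capacities: tuple[int, ...]) -> tuple[int, ...] | None:
--         if index >= len(shipment_weights):
--             return ()
--
--         current_weight = shipment_weights[index]
--         for volunteer_index, remaining_capacity in enumerate(remaining_capacities):
--             if remaining_capacity < current_weight: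
--                 continue
--             next_remaining = list(remaining_capacities)
--             next_remaining[volunteer_index] -= current_weight
--             tail = _assign(index + 1, tuple(next_remaining))
--             if tail is not None:
--                 return (volunteer_index,) + tail
--         return None
--
--     return _assign(0, volunteer_capacities)
-- ===== SOURCE B (Python) =====
-- from functools import cache
--
-- def _solve_lexicographic_flight_distribution(shipment_weights, volunteer_capacities):
--     @cache
--     def _feasible(idx, caps):
--         if idx >= len(shipment_weights):
--             return True
--         w = shipment_weights[idx]
--         for j, c in enumerate(caps):
--             if c >= w:
--                 trial = list(caps)
--                 trial[j] = c - w
--                 if _feasible(idx + 1, tuple(trial)):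
--                     return True
--         return False
--
--     caps = list(volunteer_capacities)
--     assignment = []
--     for idx, w in enumerate(shipment_weights):
--         chosen = None
--         for j, c in enumerate(caps):
--             if c >= w:
--                 trial = list(caps)
--                 trial[j] = c - w
--                 if _feasible(idx + 1, tuple(trial)):
--                     chosen = j
--                     break
--         if chosen is None:
--             return None
--         assignment.append(chosen)
--         caps[chosen] -= w
--     return tuple(assignment)
-- ===== Notes on version B (the rewrite author's own statement) =====
-- stated objective: alternative
-- what changed: Replaced the result-threading memoized backtracking DFS by a greedy commit loop that, per shipment, picks the first volunteer whose residual capacity fits and for which a separate boolean feasibility oracle says the rest can still be placed, never backtracking over committed choices.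
import Mathlib
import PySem

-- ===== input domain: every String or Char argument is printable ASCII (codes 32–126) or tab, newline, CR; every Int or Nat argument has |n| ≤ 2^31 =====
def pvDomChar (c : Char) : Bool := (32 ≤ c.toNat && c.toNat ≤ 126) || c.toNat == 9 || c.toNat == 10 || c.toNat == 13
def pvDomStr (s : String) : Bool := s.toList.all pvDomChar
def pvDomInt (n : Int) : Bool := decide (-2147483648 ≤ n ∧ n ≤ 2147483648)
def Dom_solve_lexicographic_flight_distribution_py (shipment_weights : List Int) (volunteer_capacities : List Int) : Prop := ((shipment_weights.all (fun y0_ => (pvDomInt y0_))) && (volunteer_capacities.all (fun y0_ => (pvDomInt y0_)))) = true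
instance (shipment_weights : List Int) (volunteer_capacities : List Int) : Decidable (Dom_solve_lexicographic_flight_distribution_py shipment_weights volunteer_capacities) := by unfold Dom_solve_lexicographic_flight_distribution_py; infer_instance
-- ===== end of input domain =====

-- B replaces A's result-threading backtracking DFS by a greedy commit loop with a separate
-- boolean feasibility oracle (objective: alternative; same worst-case cost; A's @cache only
-- memoizes and cannot change the returned value).

-- ===== PORT A =====
-- A's recursion on the shipment index is transcribed as the obvious structural recursion on the
-- suffix of shipment_weights starting at that index (`index >= len` ↔ suffix empty,
-- `shipment_weights[index]` ↔ head of the suffix); the inner `for volunteer_index, c in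
-- enumerate(remaining_capacities)` is pvLoopA, carrying the counter j and the not-yet-tried tail;
-- `next_remaining[j] -= w` is List.set (j is always in range while enumerating).
mutual
def pvAssignA (ws : List Int) (rc : List Int) : Option (List Int) :=
  match ws with
  | [] => some []
  | w :: ws' => pvLoopA ws' w rc 0 rc
termination_by (2 * ws.length + 1, 0)

def pvLoopA (ws' : List Int) (w : Int) (rcFull : List Int) (j : Nat) (rest : List Int) :
    Option (List Int) :=
  match rest with
  | [] => none
  | c :: tl =>
    if c < w then pvLoopA ws' w rcFull (j + 1) tl
    else
      match pvAssignA ws' (rcFull.set j (c - w)) with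
      | some tail => some ((j : Int) :: tail)
      | none => pvLoopA ws' w rcFull (j + 1) tl
termination_by (2 * ws'.length + 2, rest.length)
end

def solve_lexicographic_flight_distribution_py (shipment_weights : List Int) (volunteer_capacities : List Int) : Option (List Int) :=
  pvAssignA shipment_weights volunteer_capacities

-- ===== PORT B =====
-- Source B's `_feasible(idx, caps)` (again recursion on the suffix of shipment_weights), its inner
-- enumerate-loop, the `chosen` search of the main loop, and the main loop itself (structural
-- recursion consing the chosen index, matching list-append then tuple()).
mutual
def pvFeasB (ws : List Int) (caps : List Int) : Bool :=
  match ws with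
  | [] => true
  | w :: ws' => pvFloopB ws' w caps 0 caps
termination_by (2 * ws.length + 1, 0)

def pvFloopB (ws' : List Int) (w : Int) (capsFull : List Int) (j : Nat) (rest : List Int) : Bool :=
  match rest with
  | [] => false
  | c :: tl =>
    if w ≤ c && pvFeasB ws' (capsFull.set j (c - w)) then true
    else pvFloopB ws' w capsFull (j + 1) tl
termination_by (2 * ws'.length + 2, rest.length)
end

def pvChooseB (ws' : List Int) (w : Int) (capsFull : List Int) (j : Nat) :
    List Int → Option Nat
  | [] => none
  | c :: tl =>
    if w ≤ c && pvFeasB ws' (capsFull.set j (c - w)) then some j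
    else pvChooseB ws' w capsFull (j + 1) tl

def pvGreedyB : List Int → List Int → Option (List Int)
  | [], _ => some []
  | w :: ws', caps =>
    match pvChooseB ws' w caps 0 caps with
    | none => none
    | some j => (pvGreedyB ws' (caps.set j (caps.getD j 0 - w))).map (fun t => (j : Int) :: t)

def solve_lexicographic_flight_distribution_py_alt (shipment_weights : List Int) (volunteer_capacities : List Int) : Option (List Int) :=
  pvGreedyB shipment_weights volunteer_capacities

-- ===== PRECONDITION & SPEC =====
def Spec_solve_lexicographic_flight_distribution_py (shipment_weights : List Int) (volunteer_capacities : List Int) (out : Option (List Int)) : Prop := out = solve_lexicographic_flight_distribution_py_alt shipment_weights volunteer_capacities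
instance (shipment_weights : List Int) (volunteer_capacities : List Int) (out : Option (List Int)) : Decidable (Spec_solve_lexicographic_flight_distribution_py shipment_weights volunteer_capacities out) := by unfold Spec_solve_lexicographic_flight_distribution_py; infer_instance

-- ===== CLAIM (what is proved, stated in full; the proofs are below) =====
def Claim_equal_solve_lexicographic_flight_distribution_py : Prop := ∀ (shipment_weights : List Int) (volunteer_capacities : List Int), Dom_solve_lexicographic_flight_distribution_py shipment_weights volunteer_capacities → Spec_solve_lexicographic_flight_distribution_py shipment_weights volunteer_capacities (solve_lexicographic_flight_distribution_py shipment_weights volunteer_capacities)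

-- ===== LEMMAS AND PROOFS =====

theorem pv_floop_eq (ws' : List Int)
    (h : ∀ caps, pvFeasB ws' caps = (pvAssignA ws' caps).isSome)
    (w : Int) (rcFull : List Int) :
    ∀ (rest : List Int) (j : Nat),
      pvFloopB ws' w rcFull j rest = (pvLoopA ws' w rcFull j rest).isSome := by
  intro rest
  induction rest with
  | nil => intro j; simp [pvFloopB, pvLoopA]
  | cons c tl ih =>
    intro j
    rw [pvFloopB, pvLoopA]
    by_cases hc : c < w
    · have hwc : ¬ w ≤ c := by omega
      simp [hc, hwc, ih]
    · have hwc : w ≤ c := by omega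
      rw [h]
      cases hA : pvAssignA ws' (rcFull.set j (c - w)) with
      | some t => simp [hc, hwc]
      | none => simp [hc, hwc, ih]

theorem pv_feas_eq : ∀ (ws caps : List Int), pvFeasB ws caps = (pvAssignA ws caps).isSome := by
  intro ws
  induction ws with
  | nil => intro caps; simp [pvFeasB, pvAssignA]
  | cons w ws' ih =>
    intro caps
    rw [pvFeasB, pvAssignA]
    exact pv_floop_eq ws' ih w caps caps 0

theorem pv_loop_choose (ws' : List Int) (w : Int) (capsFull : List Int) :
    ∀ (rest : List Int) (j : Nat), capsFull.drop j = rest →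
      pvLoopA ws' w capsFull j rest =
        (match pvChooseB ws' w capsFull j rest with
         | none => none
         | some k =>
           (pvAssignA ws' (capsFull.set k (capsFull.getD k 0 - w))).map
             (fun t => (k : Int) :: t)) := by
  intro rest
  induction rest with
  | nil => intro j _; simp [pvLoopA, pvChooseB]
  | cons c tl ih =>
    intro j hdrop
    have hget : capsFull[j]? = some c := by
      have h0 : (capsFull.drop j)[0]? = some c := by rw [hdrop]; rfl
      rwa [List.getElem?_drop, Nat.add_zero] at h0
    have hgetD : capsFull.getD j 0 = c := by simp [List.getD, hget]
    have htl : capsFull.drop (j + 1) = tl := by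
      have : (capsFull.drop j).drop 1 = tl := by rw [hdrop]; rfl
      rwa [List.drop_drop] at this
    rw [pvLoopA, pvChooseB]
    by_cases hc : c < w
    · have hwc : ¬ w ≤ c := by omega
      simp only [if_pos hc, hwc, decide_false, Bool.false_and, if_neg Bool.false_ne_true]
      exact ih (j + 1) htl
    · have hwc : w ≤ c := by omega
      simp only [if_neg hc, hwc, decide_true, Bool.true_and]
      rw [pv_feas_eq]
      cases hA : pvAssignA ws' (capsFull.set j (c - w)) with
      | some t => simp [hget, hA]
      | none =>
        simp only [Option.isSome_none, if_neg Bool.false_ne_true]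
        exact ih (j + 1) htl

theorem pv_greedy_eq : ∀ (ws caps : List Int), pvGreedyB ws caps = pvAssignA ws caps := by
  intro ws
  induction ws with
  | nil => intro caps; simp [pvGreedyB, pvAssignA]
  | cons w ws' ih =>
    intro caps
    rw [pvGreedyB, pvAssignA, pv_loop_choose ws' w caps caps 0 (by simp)]
    cases hch : pvChooseB ws' w caps 0 caps with
    | none => simp
    | some k => simp [ih]

-- ===== VERDICT (by name: the statement is the Claim_ definition above) =====
theorem solve_lexicographic_flight_distribution_py_spec : Claim_equal_solve_lexicographic_flight_distribution_py := by
  intro ws caps _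
  unfold Spec_solve_lexicographic_flight_distribution_py
  unfold solve_lexicographic_flight_distribution_py solve_lexicographic_flight_distribution_py_alt
  exact (pv_greedy_eq ws caps).symm
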